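-- pv_equiv track=rewrite | github.com/joemunene-by/mac-spoofer | core/vendor.py | get_vendor_from_mac
-- ===== SOURCE A (Python) =====
-- from typing import Dict, Optional, List
--
-- VENDOR_OUIS: Dict[str, List[str]] = {
--     "Apple": ["00:03:93", "00:05:02", "00:0a:27", "00:0a:95", "00:0d:93", "00:10:fa"],
--     "Samsung": ["00:00:f0", "00:07:ab", "00:0d:e6", "00:12:47", "00:15:b9", "00:16:32"],
--     "Google": ["00:1a:11", "3c:5a:b4", "d8:eb:46", "f4:f5:d8"],
--     "Intel": ["00:02:b3", "00:03:47", "00:04:23", "00:07:e9", "00:08:ca", "00:0c:f1"],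
--     "Cisco": ["00:00:0c", "00:01:42", "00:01:43", "00:01:63", "00:01:64", "00:01:96"],
--     "Dell": ["00:06:5b", "00:08:74", "00:0a:e4", "00:0b:db", "00:0d:56", "00:0f:1f"],
--     "HP": ["00:01:e6", "00:0b:cd", "00:0d:9d", "00:0e:7f", "00:0f:20", "00:10:83"],
--     "Microsoft": ["00:03:ff", "00:12:5a", "00:15:5d", "00:17:fa", "00:1d:d8", "00:22:48"],
-- }
--
-- def get_vendor_from_mac(mac: str) -> str:
--     """
--     Identifies the vendor based on the MAC address OUI.
--
--     Args:
--         mac: The MAC address string.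
--
--     Returns:
--         The vendor name or 'Unknown'.
--     """
--     if not mac or mac == "Unknown":
--         return "Unknown"
--
--     oui = mac.upper()[:8].replace("-", ":")
--     for vendor, prefixes in VENDOR_OUIS.items():
--         if any(oui == p.upper() for p in prefixes):
--             return vendor
--     return "Unknown"
-- ===== SOURCE B (Python) =====
-- from typing import Dict, List
--
-- VENDOR_OUIS: Dict[str, List[str]] = {
--     "Apple": ["00:03:93", "00:05:02", "00:0a:27", "00:0a:95", "00:0d:93", "00:10:fa"],
--     "Samsung": ["00:00:f0", "00:07:ab", "00:0d:e6", "00:12:47", "00:15:b9", "00:16:32"],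
--     "Google": ["00:1a:11", "3c:5a:b4", "d8:eb:46", "f4:f5:d8"],
--     "Intel": ["00:02:b3", "00:03:47", "00:04:23", "00:07:e9", "00:08:ca", "00:0c:f1"],
--     "Cisco": ["00:00:0c", "00:01:42", "00:01:43", "00:01:63", "00:01:64", "00:01:96"],
--     "Dell": ["00:06:5b", "00:08:74", "00:0a:e4", "00:0b:db", "00:0d:56", "00:0f:1f"],
--     "HP": ["00:01:e6", "00:0b:cd", "00:0d:9d", "00:0e:7f", "00:0f:20", "00:10:83"],
--     "Microsoft": ["00:03:ff", "00:12:5a", "00:15:5d", "00:17:fa", "00:1d:d8", "00:22:48"],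
-- }
--
-- # Flat (uppercased prefix, vendor) pairs, sorted once by prefix; every call then
-- # binary-searches this ordered table.  Prefixes are pairwise distinct, so the
-- # element found (if any) is the unique match and equals A's first-match scan.
-- _PAIRS: List = sorted(
--     ((p.upper(), vendor) for vendor, prefixes in VENDOR_OUIS.items() for p in prefixes),
--     key=lambda kv: kv[0],
-- )
--
-- def get_vendor_from_mac(mac: str) -> str:
--     if not mac or mac == "Unknown":
--         return "Unknown"
--     oui = mac.upper()[:8].replace("-", ":")
--     lo, hi = 0, len(_PAIRS)
--     while lo < hi:
--         mid = (lo + hi) // 2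
--         key, vendor = _PAIRS[mid]
--         if key == oui:
--             return vendor
--         if oui < key:
--             hi = mid
--         else:
--             lo = mid + 1
--     return "Unknown"
-- ===== Notes on version B (the rewrite author's own statement) =====
-- stated objective: alternative
-- what changed: Replaced A's nested vendor/prefix linear scan (re-uppercasing every prefix on every call) by a table of (uppercased prefix, vendor) pairs flattened and sorted once at module load, searched per call with a hand-written binary search over the ordered prefixes.
import Mathlib
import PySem

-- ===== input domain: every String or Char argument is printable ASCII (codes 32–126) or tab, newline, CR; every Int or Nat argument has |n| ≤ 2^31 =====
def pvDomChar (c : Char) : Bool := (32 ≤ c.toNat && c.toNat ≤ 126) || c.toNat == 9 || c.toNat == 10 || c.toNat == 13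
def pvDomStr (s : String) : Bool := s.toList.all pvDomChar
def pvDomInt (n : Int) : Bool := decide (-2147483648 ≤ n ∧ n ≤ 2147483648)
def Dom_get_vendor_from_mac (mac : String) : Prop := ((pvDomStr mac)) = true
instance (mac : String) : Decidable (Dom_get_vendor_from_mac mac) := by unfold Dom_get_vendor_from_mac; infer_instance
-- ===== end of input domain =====

-- B replaces A's nested vendor/prefix linear scan by a (prefix, vendor) table
-- flattened and sorted once, binary-searched per call; objective: alternative.

-- ===== PORT A =====
-- VENDOR_OUIS as an association list in insertion order.
def vendorOUIs : List (String × List String) :=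
  [("Apple", ["00:03:93", "00:05:02", "00:0a:27", "00:0a:95", "00:0d:93", "00:10:fa"]),
   ("Samsung", ["00:00:f0", "00:07:ab", "00:0d:e6", "00:12:47", "00:15:b9", "00:16:32"]),
   ("Google", ["00:1a:11", "3c:5a:b4", "d8:eb:46", "f4:f5:d8"]),
   ("Intel", ["00:02:b3", "00:03:47", "00:04:23", "00:07:e9", "00:08:ca", "00:0c:f1"]),
   ("Cisco", ["00:00:0c", "00:01:42", "00:01:43", "00:01:63", "00:01:64", "00:01:96"]),
   ("Dell", ["00:06:5b", "00:08:74", "00:0a:e4", "00:0b:db", "00:0d:56", "00:0f:1f"]),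
   ("HP", ["00:01:e6", "00:0b:cd", "00:0d:9d", "00:0e:7f", "00:0f:20", "00:10:83"]),
   ("Microsoft", ["00:03:ff", "00:12:5a", "00:15:5d", "00:17:fa", "00:1d:d8", "00:22:48"])]

-- A's for-loop over VENDOR_OUIS.items() with early return.
def vendorScan (oui : String) : List (String × List String) → String
  | [] => "Unknown"
  | (vendor, prefixes) :: rest =>
      if prefixes.any (fun p => oui == PySem.Str.upper p) then vendor
      else vendorScan oui rest

def get_vendor_from_mac (mac : String) : String :=
  if mac == "" || mac == "Unknown" then "Unknown"
  else
    let oui := PySem.Str.replace (PySem.Str.slice (PySem.Str.upper mac) none (some 8)) "-" ":"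
    vendorScan oui vendorOUIs

-- ===== PORT B =====
-- Source B's _PAIRS: the flat (uppercased prefix, vendor) pairs, sorted once by prefix.
def pairsTable : List (String × String) :=
  PySem.List.sorted
    (vendorOUIs.flatMap (fun vp => vp.2.map (fun p => (PySem.Str.upper p, vp.1))))
    (fun kv => kv.1.toList)

-- Source B's while-loop binary search, with a fuel argument making the loop total
-- (fuel = table length + 1 strictly dominates the number of iterations).
-- Python's string '<' is code-point lexicographic: exactly List Char '<' on .toList
-- (Lean's own String '<' is kernel-opaque, so the order is taken on the char lists).
def bsearchLoop (arr : List (String × String)) (oui : String) : Nat → Nat → Nat → String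
  | 0, _, _ => "Unknown"
  | fuel + 1, lo, hi =>
      if lo < hi then
        let kv := arr.getD ((lo + hi) / 2) ("", "")
        if kv.1 == oui then kv.2
        else if oui.toList < kv.1.toList then bsearchLoop arr oui fuel lo ((lo + hi) / 2)
        else bsearchLoop arr oui fuel ((lo + hi) / 2 + 1) hi
      else "Unknown"

def get_vendor_from_mac_alt (mac : String) : String :=
  if mac == "" || mac == "Unknown" then "Unknown"
  else
    let oui := PySem.Str.replace (PySem.Str.slice (PySem.Str.upper mac) none (some 8)) "-" ":"
    bsearchLoop pairsTable oui (pairsTable.length + 1) 0 pairsTable.length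

-- ===== PRECONDITION & SPEC =====
def Spec_get_vendor_from_mac (mac : String) (out : String) : Prop := out = get_vendor_from_mac_alt mac
instance (mac : String) (out : String) : Decidable (Spec_get_vendor_from_mac mac out) := by unfold Spec_get_vendor_from_mac; infer_instance

-- ===== CLAIM (what is proved, stated in full; the proofs are below) =====
def Claim_equal_get_vendor_from_mac : Prop := ∀ (mac : String), Dom_get_vendor_from_mac mac → Spec_get_vendor_from_mac mac (get_vendor_from_mac mac)

-- ===== LEMMAS AND PROOFS =====

-- The 46 uppercased OUI prefixes; used only to case-split the proof.
def pvKeys : List String :=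
  [ "00:03:93", "00:05:02", "00:0A:27", "00:0A:95", "00:0D:93", "00:10:FA",
    "00:00:F0", "00:07:AB", "00:0D:E6", "00:12:47", "00:15:B9", "00:16:32",
    "00:1A:11", "3C:5A:B4", "D8:EB:46", "F4:F5:D8",
    "00:02:B3", "00:03:47", "00:04:23", "00:07:E9", "00:08:CA", "00:0C:F1",
    "00:00:0C", "00:01:42", "00:01:43", "00:01:63", "00:01:64", "00:01:96",
    "00:06:5B", "00:08:74", "00:0A:E4", "00:0B:DB", "00:0D:56", "00:0F:1F",
    "00:01:E6", "00:0B:CD", "00:0D:9D", "00:0E:7F", "00:0F:20", "00:10:83",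
    "00:03:FF", "00:12:5A", "00:15:5D", "00:17:FA", "00:1D:D8", "00:22:48" ]

-- If oui matches no uppercased prefix of the table, A's scan returns "Unknown".
theorem vendorScan_unknown (oui : String) (tbl : List (String × List String))
    (h : ∀ vp ∈ tbl, ∀ p ∈ vp.2, PySem.Str.upper p ≠ oui) :
    vendorScan oui tbl = "Unknown" := by
  induction tbl with
  | nil => rfl
  | cons hd rest ih =>
      obtain ⟨vendor, prefixes⟩ := hd
      have hno : prefixes.any (fun p => oui == PySem.Str.upper p) = false := by
        rw [List.any_eq_false]
        intro p hp hc
        exact h (vendor, prefixes) List.mem_cons_self p hp (beq_iff_eq.mp hc).symm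
      simp only [vendorScan, hno, Bool.false_eq_true, if_false]
      exact ih (fun vp hvp => h vp (List.mem_cons_of_mem _ hvp))

-- If oui equals no key of arr, the binary search returns "Unknown" (any order, any fuel).
theorem bsearchLoop_unknown (arr : List (String × String)) (oui : String)
    (h : ∀ kv ∈ arr, kv.1 ≠ oui) :
    ∀ fuel lo hi, hi ≤ arr.length → bsearchLoop arr oui fuel lo hi = "Unknown" := by
  intro fuel
  induction fuel with
  | zero => intro lo hi _; rfl
  | succ n ih =>
      intro lo hi hhi
      rw [bsearchLoop]
      by_cases hlt : lo < hi
      · rw [if_pos hlt]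
        have hmid : (lo + hi) / 2 < arr.length := by omega
        have hmem : arr.getD ((lo + hi) / 2) ("", "") ∈ arr := by
          rw [List.getD_eq_getElem arr ("", "") hmid]
          exact List.getElem_mem hmid
        have hne : (arr.getD ((lo + hi) / 2) ("", "")).1 ≠ oui := h _ hmem
        simp only [beq_eq_false_iff_ne.mpr hne, Bool.false_eq_true, if_false]
        by_cases hcmp : oui.toList < (arr.getD ((lo + hi) / 2) ("", "")).1.toList
        · rw [if_pos hcmp]; exact ih lo ((lo + hi) / 2) (by omega)
        · rw [if_neg hcmp]; exact ih ((lo + hi) / 2 + 1) hi hhi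
      · rw [if_neg hlt]

-- The core equivalence, for an arbitrary oui string.
theorem scan_eq_bsearch (oui : String) :
    vendorScan oui vendorOUIs
      = bsearchLoop pairsTable oui (pairsTable.length + 1) 0 pairsTable.length := by
  by_cases h : oui ∈ pvKeys
  · -- oui is one of the 46 uppercased prefixes: both sides are closed computations.
    fin_cases h <;> decide
  · -- oui matches no prefix: both sides return "Unknown".
    have hall : ∀ vp ∈ vendorOUIs, ∀ p ∈ vp.2, PySem.Str.upper p ∈ pvKeys := by decide
    have htab : ∀ kv ∈ pairsTable, kv.1 ∈ pvKeys := by decide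
    rw [vendorScan_unknown oui vendorOUIs
          (fun vp hvp p hp heq => h (heq ▸ hall vp hvp p hp)),
        bsearchLoop_unknown pairsTable oui
          (fun kv hkv heq => h (heq ▸ htab kv hkv)) _ 0 _ le_rfl]

-- ===== VERDICT (by name: the statement is the Claim_ definition above) =====
theorem get_vendor_from_mac_spec : Claim_equal_get_vendor_from_mac := by
  intro mac _
  unfold Spec_get_vendor_from_mac get_vendor_from_mac get_vendor_from_mac_alt
  cases hg : (mac == "" || mac == "Unknown") with
  | true => rw [if_pos rfl, if_pos rfl]
  | false =>
      rw [if_neg (by simp), if_neg (by simp)]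
      exact scan_eq_bsearch _
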